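-- pv_equiv track=rewrite | github.com/calvinnwq/reasoning-benchmark | scripts/score_run.py | contains_expected_as_contiguous_span
-- ===== SOURCE A (Python) =====
-- from typing import Any, Dict, Iterable, List, Optional, Sequence, Tuple
--
-- def contains_expected_as_contiguous_span(answer_tokens: Sequence[str], expected_tokens: Sequence[str]) -> bool:
--     if not expected_tokens or not answer_tokens:
--         return False
--     if len(expected_tokens) > len(answer_tokens):
--         return False
--     if len(expected_tokens) == 1:
--         return expected_tokens[0] in answer_tokens
--
--     needle = tuple(expected_tokens)
--     haystack = tuple(answer_tokens)
--     for index in range(len(haystack) - len(needle) + 1):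
--         if haystack[index : index + len(needle)] == needle:
--             return True
--     return False
-- ===== SOURCE B (Python) =====
-- def contains_expected_as_contiguous_span(answer_tokens, expected_tokens):
--     # Bit-parallel Shift-And search: one bitmask per distinct pattern token,
--     # then a single pass over the answer carrying a match-state integer whose
--     # bit k means "the first k+1 pattern tokens end at the current position".
--     pattern = list(expected_tokens)
--     text = list(answer_tokens)
--     m = len(pattern)
--     if m == 0 or not text:
--         return False
--     masks = {}
--     bit = 1
--     for tok in pattern:
--         masks[tok] = masks.get(tok, 0) | bit
--         bit <<= 1
--     goal = 1 << (m - 1)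
--     state = 0
--     for tok in text:
--         state = ((state << 1) | 1) & masks.get(tok, 0)
--         if state & goal:
--             return True
--     return False
-- ===== Notes on version B (the rewrite author's own statement) =====
-- stated objective: alternative
-- what changed: Replaced the offset-by-offset tuple-slice comparison with the bit-parallel Shift-And algorithm: a bitmask per distinct pattern token built once, then a single pass over the answer updating one match-state integer per token.
import Mathlib
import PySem

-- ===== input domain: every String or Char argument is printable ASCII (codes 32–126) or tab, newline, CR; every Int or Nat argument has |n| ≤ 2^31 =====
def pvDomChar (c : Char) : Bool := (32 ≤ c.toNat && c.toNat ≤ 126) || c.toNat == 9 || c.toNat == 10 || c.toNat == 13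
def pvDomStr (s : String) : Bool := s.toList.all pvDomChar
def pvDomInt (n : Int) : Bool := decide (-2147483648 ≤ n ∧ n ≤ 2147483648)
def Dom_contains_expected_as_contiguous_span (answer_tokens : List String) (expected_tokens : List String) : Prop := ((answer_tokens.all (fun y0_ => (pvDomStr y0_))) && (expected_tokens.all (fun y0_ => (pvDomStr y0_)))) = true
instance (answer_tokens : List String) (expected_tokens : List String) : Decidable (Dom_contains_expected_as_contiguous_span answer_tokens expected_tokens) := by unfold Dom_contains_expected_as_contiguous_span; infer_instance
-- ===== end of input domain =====

-- B replaces A's offset-by-offset tuple-slice scan with the bit-parallel Shift-And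
-- algorithm (a bitmask per distinct pattern token built once, one match-state integer
-- updated per answer token): a genuinely different algorithm of comparable cost.

-- ===== PORT A =====
-- literal transliteration of A: the two guards, the single-token membership case, then
-- 'for index in range(len(haystack) - len(needle) + 1): if haystack[index:index+len(needle)] == needle: return True'
-- (the early return is carried as a Bool accumulator; expected_tokens[0], taken on a
-- list the first guard proved nonempty, is ported as headD "").
def contains_expected_as_contiguous_span (answer_tokens : List String) (expected_tokens : List String) : Bool :=
  if expected_tokens.isEmpty || answer_tokens.isEmpty then false
  else if (answer_tokens.length : Int) < (expected_tokens.length : Int) then false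
  else if expected_tokens.length == 1 then answer_tokens.contains (expected_tokens.headD "")
  else
    let needle := expected_tokens
    let haystack := answer_tokens
    (PySem.List.pyRange 0 ((haystack.length : Int) - (needle.length : Int) + 1) 1).foldl
      (fun found index =>
        found || decide (PySem.List.slice haystack (some index) (some (index + (needle.length : Int))) = needle))
      false

-- ===== PORT B =====
-- Source B's mask-building loop: state = (masks dict, current bit); the Python ints here
-- are the nonnegative bitmasks, ported exactly as Nat ('|' = |||, '<<= 1' = <<< 1).
def pvBuildMasks (pattern : List String) : PySem.Dict String Nat × Nat :=
  pattern.foldl (fun s tok => (s.1.insert tok (s.1.getD tok 0 ||| s.2), s.2 <<< 1))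
    (PySem.Dict.empty, 1)

-- Source B's scanning loop with its early return ('if state & goal:' is 'state & goal ≠ 0').
def pvShiftAndGo (masks : PySem.Dict String Nat) (goal : Nat) : Nat → List String → Bool
  | _, [] => false
  | state, tok :: rest =>
    let s' := ((state <<< 1) ||| 1) &&& masks.getD tok 0
    if (s' &&& goal) ≠ 0 then true else pvShiftAndGo masks goal s' rest

def contains_expected_as_contiguous_span_alt (answer_tokens : List String) (expected_tokens : List String) : Bool :=
  let pattern := expected_tokens
  let text := answer_tokens
  let m := pattern.length
  if m == 0 || text.isEmpty then false
  else
    let masks := (pvBuildMasks pattern).1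
    let goal : Nat := 1 <<< (m - 1)
    pvShiftAndGo masks goal 0 text

-- ===== PRECONDITION & SPEC =====
def Spec_contains_expected_as_contiguous_span (answer_tokens : List String) (expected_tokens : List String) (out : Bool) : Prop := out = contains_expected_as_contiguous_span_alt answer_tokens expected_tokens
instance (answer_tokens : List String) (expected_tokens : List String) (out : Bool) : Decidable (Spec_contains_expected_as_contiguous_span answer_tokens expected_tokens out) := by unfold Spec_contains_expected_as_contiguous_span; infer_instance

-- ===== CLAIM (what is proved, stated in full; the proofs are below) =====
def Claim_equal_contains_expected_as_contiguous_span : Prop := ∀ (answer_tokens : List String) (expected_tokens : List String), Dom_contains_expected_as_contiguous_span answer_tokens expected_tokens → Spec_contains_expected_as_contiguous_span answer_tokens expected_tokens (contains_expected_as_contiguous_span answer_tokens expected_tokens)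

-- ===== LEMMAS AND PROOFS =====

-- bit k of 1 is set only for k = 0
theorem pv_testBit_one' (k : Nat) : Nat.testBit 1 k = decide (k = 0) := by
  cases k with
  | zero => decide
  | succ n => simp [Nat.testBit_succ]

-- x & 2^n is nonzero exactly when bit n of x is set
theorem pv_and_two_pow_ne (x n : Nat) : (x &&& 2^n ≠ 0) ↔ x.testBit n = true := by
  rw [Nat.and_two_pow]
  cases h : x.testBit n <;> simp [Nat.pow_eq_zero]

-- suffix of an appended singleton
theorem pv_concat_suffix_concat (l t : List String) (a b : String) :
    (l ++ [a] <:+ t ++ [b]) ↔ (a = b ∧ l <:+ t) := by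
  rw [← List.reverse_prefix]
  simp [List.cons_prefix_cons]

-- one insertion step of the mask-building loop preserves the mask characterisation
theorem pv_build_step (q : List String) (d : PySem.Dict String Nat) (tok : String)
    (hd : ∀ c k, ((d.getD c 0).testBit k = true ↔ q[k]? = some c)) (c' : String) (k' : Nat) :
    (((d.insert tok (d.getD tok 0 ||| 2 ^ q.length)).getD c' 0).testBit k' = true
        ↔ (q ++ [tok])[k']? = some c') := by
  rw [PySem.Dict.getD_insert]
  by_cases hc : c' = tok
  · subst hc
    rw [if_pos rfl, Nat.testBit_or, Nat.testBit_two_pow]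
    by_cases hk : k' < q.length
    · rw [List.getElem?_append_left hk]
      have hne : ¬ (q.length = k') := by omega
      simp [hne, hd c' k']
    · rw [List.getElem?_append_right (by omega)]
      have h0 : q[k']? = none := by exact List.getElem?_eq_none (by omega)
      have h1 : (d.getD c' 0).testBit k' = false := by
        rcases h : (d.getD c' 0).testBit k' with _ | _
        · rfl
        · exact absurd ((hd c' k').mp h) (by simp [h0])
      rcases Nat.lt_or_ge (k' - q.length) 1 with h2 | h2
      · have : k' = q.length := by omega
        simp [this, h1]
      · have : [c'][k' - q.length]? = none := List.getElem?_eq_none (by simpa using h2)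
        simp [this, h1]
        omega
  · rw [if_neg hc, hd c' k']
    by_cases hk : k' < q.length
    · rw [List.getElem?_append_left hk]
    · rw [List.getElem?_append_right (by omega)]
      have h0 : q[k']? = none := List.getElem?_eq_none (by omega)
      rcases Nat.lt_or_ge (k' - q.length) 1 with h2 | h2
      · have : k' - q.length = 0 := by omega
        simp [this, h0, Ne.symm hc]
      · have : [tok][k' - q.length]? = none := List.getElem?_eq_none (by simpa using h2)
        simp [this, h0]

-- the mask-building fold, characterised relative to an already-processed prefix q
theorem pv_build_inv (p : List String) : ∀ (q : List String) (d : PySem.Dict String Nat),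
    (∀ c k, ((d.getD c 0).testBit k = true ↔ q[k]? = some c)) → ∀ (c : String) (k : Nat),
    (((p.foldl (fun s tok => (s.1.insert tok (s.1.getD tok 0 ||| s.2), s.2 <<< 1))
        (d, 2 ^ q.length)).1.getD c 0).testBit k = true ↔ (q ++ p)[k]? = some c) := by
  induction p with
  | nil => intro q d hd c k; simpa using hd c k
  | cons tok p ih =>
    intro q d hd c k
    have hpow : (2 ^ q.length) <<< 1 = 2 ^ (q ++ [tok]).length := by
      rw [Nat.shiftLeft_eq]; simp [pow_succ]
    have := ih (q ++ [tok]) (d.insert tok (d.getD tok 0 ||| 2 ^ q.length))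
      (pv_build_step q d tok hd) c k
    rw [List.foldl_cons, hpow]
    simpa using this

-- bit k of the mask of token c is set exactly when the pattern has c at position k
theorem pv_masks_char (p : List String) (c : String) (k : Nat) :
    (((pvBuildMasks p).1.getD c 0).testBit k = true ↔ p[k]? = some c) := by
  have h := pv_build_inv p [] PySem.Dict.empty (by simp [PySem.Dict.getD_empty]) c k
  simpa [pvBuildMasks] using h

-- the Shift-And state invariant: bit k set ⟺ the first k+1 pattern tokens are a suffix of the consumed text
def pvInv (P t : List String) (state : Nat) : Prop :=
  ∀ k : Nat, (state.testBit k = true ↔ (k < P.length ∧ P.take (k+1) <:+ t))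

theorem pv_take_suffix_concat (P t : List String) (tok : String) (k : Nat) (hk : k < P.length) :
    (P.take (k+1) <:+ t ++ [tok]) ↔ (P[k] = tok ∧ P.take k <:+ t) := by
  rw [List.take_add_one, List.getElem?_eq_getElem hk, Option.toList_some]
  exact pv_concat_suffix_concat (P.take k) t (P[k]) tok

-- one state update of the scanning loop preserves the invariant
theorem pv_step_inv (P t : List String) (tok : String) (state : Nat)
    (hinv : pvInv P t state) :
    pvInv P (t ++ [tok]) (((state <<< 1) ||| 1) &&& (pvBuildMasks P).1.getD tok 0) := by
  intro k
  rw [Nat.testBit_and, Nat.testBit_or, Nat.testBit_shiftLeft, pv_testBit_one']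
  rw [Bool.and_eq_true, Bool.or_eq_true]
  cases k with
  | zero =>
    constructor
    · rintro ⟨_, hm⟩
      have hm' := (pv_masks_char P tok 0).mp hm
      have hlt : 0 < P.length := by
        by_contra h
        rw [List.getElem?_eq_none (by omega)] at hm'
        simp at hm'
      refine ⟨hlt, ?_⟩
      rw [pv_take_suffix_concat P t tok 0 hlt]
      rw [List.getElem?_eq_getElem hlt] at hm'
      exact ⟨by simpa using hm', by simp⟩
    · rintro ⟨hlt, hs⟩
      rw [pv_take_suffix_concat P t tok 0 hlt] at hs
      refine ⟨Or.inr (by simp), (pv_masks_char P tok 0).mpr ?_⟩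
      rw [List.getElem?_eq_getElem hlt, hs.1]
  | succ j =>
    constructor
    · rintro ⟨hsh, hm⟩
      have hm' := (pv_masks_char P tok (j+1)).mp hm
      have hlt : j + 1 < P.length := by
        by_contra h
        rw [List.getElem?_eq_none (by omega)] at hm'
        simp at hm'
      rw [List.getElem?_eq_getElem hlt] at hm'
      have hst : state.testBit j = true := by
        rcases hsh with h | h
        · simpa using h
        · simp at h
      have hj := (hinv j).mp hst
      refine ⟨hlt, ?_⟩
      rw [pv_take_suffix_concat P t tok (j+1) hlt]
      exact ⟨by simpa using hm', by simpa using hj.2⟩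
    · rintro ⟨hlt, hs⟩
      rw [pv_take_suffix_concat P t tok (j+1) hlt] at hs
      have hstj : state.testBit j = true := (hinv j).mpr ⟨by omega, by simpa using hs.2⟩
      refine ⟨Or.inl (by simp [hstj]), (pv_masks_char P tok (j+1)).mpr ?_⟩
      rw [List.getElem?_eq_getElem hlt, hs.1]

-- the scanning loop hits exactly when the whole pattern ends inside the remaining text
theorem pv_go_iff (P : List String) (hP : P ≠ []) (rest : List String) : ∀ (t : List String) (state : Nat),
    pvInv P t state →
    (pvShiftAndGo (pvBuildMasks P).1 (1 <<< (P.length - 1)) state rest = true ↔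
      ∃ j : Nat, j < rest.length ∧ P <:+ t ++ rest.take (j+1)) := by
  induction rest with
  | nil => intro t state _; simp [pvShiftAndGo]
  | cons tok rest ih =>
    intro t state hinv
    rw [pvShiftAndGo]
    have hgoal : (1 : Nat) <<< (P.length - 1) = 2 ^ (P.length - 1) := by
      rw [Nat.shiftLeft_eq, one_mul]
    have hinv' := pv_step_inv P t tok state hinv
    have hm1 : P.length - 1 < P.length := by
      have := List.length_pos_iff.mpr hP; omega
    have hhit : ((((state <<< 1) ||| 1) &&& (pvBuildMasks P).1.getD tok 0) &&& 1 <<< (P.length - 1) ≠ 0)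
        ↔ P <:+ t ++ [tok] := by
      rw [hgoal, pv_and_two_pow_ne]
      rw [hinv' (P.length - 1)]
      have : P.length - 1 + 1 = P.length := by omega
      rw [this, List.take_length]
      exact ⟨fun h => h.2, fun h => ⟨hm1, h⟩⟩
    by_cases hcase : P <:+ t ++ [tok]
    · rw [if_pos (hhit.mpr hcase)]
      constructor
      · intro _
        exact ⟨0, by simp, by simpa using hcase⟩
      · intro _; rfl
    · rw [if_neg (fun h => hcase (hhit.mp h))]
      rw [ih (t ++ [tok]) _ hinv']
      constructor
      · rintro ⟨j, hj, hsuf⟩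
        refine ⟨j + 1, by simpa using Nat.succ_lt_succ hj, ?_⟩
        rw [List.take_succ_cons]
        simpa [List.append_assoc] using hsuf
      · rintro ⟨j, hj, hsuf⟩
        cases j with
        | zero =>
          exfalso; apply hcase
          simpa using hsuf
        | succ j' =>
          refine ⟨j', by simpa using Nat.lt_of_succ_lt_succ hj, ?_⟩
          rw [List.take_succ_cons] at hsuf
          simpa [List.append_assoc] using hsuf

-- "the pattern is a suffix of some nonempty prefix" is exactly "the pattern is an infix"
theorem pv_exists_take_iff (T P : List String) (hP : P ≠ []) :
    (∃ j : Nat, j < T.length ∧ P <:+ T.take (j+1)) ↔ P <:+: T := by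
  constructor
  · rintro ⟨j, _, hsuf⟩
    exact hsuf.isInfix.trans (T.take_prefix (j+1)).isInfix
  · rintro ⟨s, u, hsu⟩
    have hplen : 0 < P.length := List.length_pos_iff.mpr hP
    refine ⟨s.length + P.length - 1, ?_, ?_⟩
    · have : T.length = s.length + P.length + u.length := by
        rw [← hsu]; simp; omega
      omega
    · have hj : s.length + P.length - 1 + 1 = (s ++ P).length := by
        simp; omega
      rw [hj, ← hsu, List.append_assoc]
      rw [← List.append_assoc]
      have : ((s ++ P) ++ u).take (s ++ P).length = s ++ P := List.take_left
      rw [this]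
      exact List.suffix_append s P

-- B decides "expected is nonempty and an infix of answer"
theorem pv_alt_iff (T P : List String) :
    (contains_expected_as_contiguous_span_alt T P = true ↔ (P ≠ [] ∧ P <:+: T)) := by
  show (if (P.length == 0 || T.isEmpty) = true then false
    else pvShiftAndGo (pvBuildMasks P).1 (1 <<< (P.length - 1)) 0 T) = true ↔ (P ≠ [] ∧ P <:+: T)
  by_cases hPe : P = []
  · subst hPe; simp
  by_cases hTe : T = []
  · subst hTe
    have : (P.length == 0 || List.isEmpty ([] : List String)) = true := by simp
    rw [if_pos this]
    simp only [Bool.false_eq_true, false_iff, not_and]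
    intro _ h
    exact hPe (List.eq_nil_of_infix_nil h)
  have h1 : (P.length == 0 || T.isEmpty) = false := by
    simp [List.isEmpty_eq_false_iff.mpr hTe, List.length_eq_zero_iff, hPe]
  rw [h1]
  simp only [Bool.false_eq_true, if_false]
  have hinv0 : pvInv P [] 0 := by
    intro k
    rw [Nat.zero_testBit]
    simp only [Bool.false_eq_true, false_iff, not_and]
    intro _
    rw [List.suffix_nil]
    intro h
    exact hPe (by simpa using List.take_eq_nil_iff.mp h)
  rw [pv_go_iff P hPe T [] 0 hinv0]
  simp only [List.nil_append]
  rw [pv_exists_take_iff T P hPe]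
  exact ⟨fun h => ⟨hPe, h⟩, fun h => h.2⟩

-- A's early-return accumulator is an 'any'
theorem pv_foldl_or (p : Int → Bool) (l : List Int) : ∀ (b : Bool),
    l.foldl (fun acc x => acc || p x) b = (b || l.any p) := by
  induction l with
  | nil => intro b; simp
  | cons x l ih =>
    intro b
    rw [List.foldl_cons, ih (b || p x), List.any_cons]
    cases b <;> simp

theorem pv_drop_take_infix (T P : List String) (k : Nat)
    (h : (T.drop k).take P.length = P) : P <:+: T :=
  h ▸ (((T.drop k).take_prefix P.length).isInfix.trans (T.drop_suffix k).isInfix)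

theorem pv_infix_drop_take (T P : List String) (h : P <:+: T) :
    ∃ k : Nat, (T.drop k).take P.length = P := by
  rcases h with ⟨s, u, hsu⟩
  refine ⟨s.length, ?_⟩
  rw [← hsu, List.append_assoc]
  rw [List.drop_left, List.take_left]

theorem pv_drop_take_bound (T P : List String) (hP : P ≠ []) (k : Nat)
    (h : (T.drop k).take P.length = P) : k + P.length ≤ T.length := by
  have hlen : ((T.drop k).take P.length).length = P.length := by rw [h]
  rw [List.length_take, List.length_drop] at hlen
  have hplen : 0 < P.length := List.length_pos_iff.mpr hP
  omega

-- A decides the same proposition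
theorem pv_a_iff (T P : List String) :
    (contains_expected_as_contiguous_span T P = true ↔ (P ≠ [] ∧ P <:+: T)) := by
  unfold contains_expected_as_contiguous_span
  by_cases hPe : P = []
  · subst hPe; simp
  by_cases hTe : T = []
  · subst hTe
    have : (P.isEmpty || List.isEmpty ([] : List String)) = true := by simp
    rw [if_pos this]
    simp only [Bool.false_eq_true, false_iff, not_and]
    intro _ h
    exact hPe (List.eq_nil_of_infix_nil h)
  have h0 : (P.isEmpty || T.isEmpty) = false := by
    simp [List.isEmpty_eq_false_iff.mpr hTe, List.isEmpty_eq_false_iff.mpr hPe]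
  rw [h0]
  simp only [Bool.false_eq_true, if_false]
  by_cases hlen : (T.length : Int) < (P.length : Int)
  · rw [if_pos hlen]
    simp only [Bool.false_eq_true, false_iff, not_and]
    intro _ h
    have := List.IsInfix.length_le h
    omega
  rw [if_neg hlen]
  by_cases h1 : P.length = 1
  · rw [if_pos (by simpa using h1)]
    rcases P with _ | ⟨x, P'⟩
    · exact absurd rfl hPe
    · have hP' : P' = [] := by simpa using h1
      subst hP'
      rw [List.contains_iff_mem]
      simp only [List.headD_cons]
      rw [← List.singleton_infix_iff]
      exact ⟨fun h => ⟨hPe, h⟩, fun h => h.2⟩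
  · rw [if_neg (by simpa using h1)]
    rw [pv_foldl_or]
    rw [Bool.false_or, List.any_eq_true]
    constructor
    · rintro ⟨i, hmem, hdec⟩
      rw [PySem.List.mem_pyRange_one] at hmem
      obtain ⟨k, rfl⟩ := Int.eq_ofNat_of_zero_le hmem.1
      rw [PySem.List.slice_natCast_add] at hdec
      exact ⟨hPe, pv_drop_take_infix T P k (by simpa using hdec)⟩
    · rintro ⟨_, hinf⟩
      obtain ⟨k, hk⟩ := pv_infix_drop_take T P hinf
      have hb := pv_drop_take_bound T P hPe k hk
      refine ⟨(k : Int), ?_, ?_⟩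
      · rw [PySem.List.mem_pyRange_one]
        constructor
        · positivity
        · omega
      · rw [PySem.List.slice_natCast_add]
        simpa using hk

-- ===== VERDICT (by name: the statement is the Claim_ definition above) =====
theorem contains_expected_as_contiguous_span_spec : Claim_equal_contains_expected_as_contiguous_span := by
  intro T P _
  unfold Spec_contains_expected_as_contiguous_span
  have ha := pv_a_iff T P
  have hb := pv_alt_iff T P
  cases h1 : contains_expected_as_contiguous_span T P <;>
    cases h2 : contains_expected_as_contiguous_span_alt T P <;> simp_all
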